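-- pv_equiv track=rewrite | github.com/homejerry99/data_structure_notes | 2_3_AnagramCheck/test1.py | checkEveryLetter
-- ===== SOURCE A (Python) =====
-- def checkEveryLetter(string1,string2):
--     pos1 = 0
--     string2List = list(string2)
--     checkFailure = False
--     while not checkFailure and pos1 < len(string1):
--         pos2 = 0
--         found = False
--         while not found and pos2 < len(string2):
--             if string1[pos1] == string2List[pos2]:
--                 string2List[pos2] = None
--                 found = True
--             else:
--                 pos2 = pos2 + 1
--         if not found:
--             checkFailure = True
--         else:
--             pos1 = pos1 + 1
--     return checkFailure
-- ===== SOURCE B (Python) =====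
-- def checkEveryLetter(string1, string2):
--     counts = {}
--     for c in string2:
--         counts[c] = counts.get(c, 0) + 1
--     for c in string1:
--         n = counts.get(c, 0)
--         if n == 0:
--             return True
--         counts[c] = n - 1
--     return False
-- ===== Notes on version B (the rewrite author's own statement) =====
-- stated objective: faster
-- what changed: Replaces A's per-character linear scan over a mutated copy of string2 with a character-count dictionary built once, turning the nested loops into two single passes.
import Mathlib
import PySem

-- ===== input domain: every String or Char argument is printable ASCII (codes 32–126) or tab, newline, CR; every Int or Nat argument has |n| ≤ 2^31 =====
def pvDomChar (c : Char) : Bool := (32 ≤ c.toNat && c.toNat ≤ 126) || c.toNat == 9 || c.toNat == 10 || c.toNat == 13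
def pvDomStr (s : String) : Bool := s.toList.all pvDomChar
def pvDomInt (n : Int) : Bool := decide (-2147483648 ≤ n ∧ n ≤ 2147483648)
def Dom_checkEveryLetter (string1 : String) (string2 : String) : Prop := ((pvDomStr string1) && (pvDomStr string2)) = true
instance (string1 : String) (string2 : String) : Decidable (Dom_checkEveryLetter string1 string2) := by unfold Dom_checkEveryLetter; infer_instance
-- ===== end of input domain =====

-- B replaces A's nested per-character scan over a mutated copy of string2 by a
-- character-count dictionary built once, then a single pass over string1 (faster).


-- ===== PORT A =====
-- inner while loop: scan string2List from the front for the first slot equal to c;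
-- on a hit overwrite it with None (here: none) and report the updated list.
def pvInnerScan (c : Char) : List (Option Char) → Option (List (Option Char))
  | [] => none
  | x :: xs =>
    if some c = x then some (none :: xs)
    else (pvInnerScan c xs).map (x :: ·)

-- outer while loop over string1; checkFailure becomes the `true` result.
def pvOuterLoop : List Char → List (Option Char) → Bool
  | [], _ => false
  | c :: cs, l =>
    match pvInnerScan c l with
    | none => true
    | some l' => pvOuterLoop cs l'

def checkEveryLetter (string1 : String) (string2 : String) : Bool :=
  pvOuterLoop string1.toList (string2.toList.map some)

-- ===== PORT B =====
-- counts[c] = counts.get(c, 0) + 1 over string2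
def pvCounts (l : List Char) : PySem.Dict Char Int :=
  l.foldl (fun d c => d.insert c (d.getD c 0 + 1)) PySem.Dict.empty

-- single pass over string1, decrementing; early True when a count is exhausted
def pvScan : List Char → PySem.Dict Char Int → Bool
  | [], _ => false
  | c :: cs, d =>
    let n := d.getD c 0
    if n = 0 then true else pvScan cs (d.insert c (n - 1))

def checkEveryLetter_alt (string1 : String) (string2 : String) : Bool :=
  pvScan string1.toList (pvCounts string2.toList)

-- ===== PRECONDITION & SPEC =====
def Spec_checkEveryLetter (string1 : String) (string2 : String) (out : Bool) : Prop := out = checkEveryLetter_alt string1 string2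
instance (string1 : String) (string2 : String) (out : Bool) : Decidable (Spec_checkEveryLetter string1 string2 out) := by unfold Spec_checkEveryLetter; infer_instance

-- ===== CLAIM (what is proved, stated in full; the proofs are below) =====
def Claim_equal_checkEveryLetter : Prop := ∀ (string1 : String) (string2 : String), Dom_checkEveryLetter string1 string2 → Spec_checkEveryLetter string1 string2 (checkEveryLetter string1 string2)

-- ===== LEMMAS AND PROOFS =====

-- the inner scan fails exactly when no live slot holds c
theorem pvInnerScan_eq_none_iff (c : Char) (l : List (Option Char)) :
    pvInnerScan c l = none ↔ l.count (some c) = 0 := by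
  induction l with
  | nil => simp [pvInnerScan]
  | cons x xs ih =>
    simp only [pvInnerScan]
    by_cases h : some c = x
    · subst h; simp
    · simp [h, Option.map_eq_none_iff, ih, Ne.symm h]

-- a successful inner scan removes exactly one occurrence of c and nothing else
theorem pvInnerScan_count (c : Char) (l l' : List (Option Char))
    (h : pvInnerScan c l = some l') (c' : Char) :
    l'.count (some c') = l.count (some c') - (if c' = c then 1 else 0) := by
  induction l generalizing l' with
  | nil => simp [pvInnerScan] at h
  | cons x xs ih =>
    simp only [pvInnerScan] at h
    by_cases hx : some c = x
    · subst hx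
      rw [if_pos rfl] at h
      injection h with h
      subst h
      by_cases hc : c' = c
      · subst hc; simp
      · simp [hc, Ne.symm hc]
    · rw [if_neg hx] at h
      rcases Option.map_eq_some_iff.mp h with ⟨ys, hys, rfl⟩
      have hih := ih ys hys
      by_cases hc : c' = c
      · subst hc
        have hne : ¬ (x = some c') := fun hh => hx hh.symm
        simp [hne, hih]
      · simp only [if_neg hc] at hih ⊢
        simp [List.count_cons, hih]

-- the loop invariant: the dictionary counts the live slots
theorem pvOuterLoop_eq_pvScan (s1 : List Char) (l : List (Option Char)) (d : PySem.Dict Char Int)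
    (hinv : ∀ c, d.getD c 0 = (l.count (some c) : Int)) :
    pvOuterLoop s1 l = pvScan s1 d := by
  induction s1 generalizing l d with
  | nil => simp [pvOuterLoop, pvScan]
  | cons c cs ih =>
    simp only [pvOuterLoop, pvScan]
    have hc := hinv c
    cases hfind : pvInnerScan c l with
    | none =>
      have h0 : l.count (some c) = 0 := (pvInnerScan_eq_none_iff c l).mp hfind
      rw [if_pos (by rw [hc, h0]; rfl)]
    | some l' =>
      have hpos : l.count (some c) ≠ 0 := by
        intro h0
        rw [(pvInnerScan_eq_none_iff c l).mpr h0] at hfind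
        simp at hfind
      rw [if_neg (by rw [hc]; exact_mod_cast hpos)]
      apply ih
      intro c'
      rw [PySem.Dict.getD_insert, pvInnerScan_count c l l' hfind c']
      by_cases hcc : c' = c
      · subst hcc
        rw [if_pos rfl, if_pos rfl, hc]
        have hge : 1 ≤ l.count (some c') := Nat.one_le_iff_ne_zero.mpr hpos
        push_cast [Nat.cast_sub hge]
        ring
      · simp [hcc, hinv c']

-- the built counter counts string2's characters = the initial live slots
theorem pvCounts_getD (l : List Char) (c : Char) :
    (pvCounts l).getD c 0 = ((l.map some).count (some c) : Int) := by
  rw [pvCounts, PySem.Dict.getD_foldl_insert_add_one, PySem.Dict.getD_empty,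
      List.count_map_of_injective l some (fun _ _ => Option.some.inj)]
  simp

-- ===== VERDICT (by name: the statement is the Claim_ definition above) =====
theorem checkEveryLetter_spec : Claim_equal_checkEveryLetter := by
  intro s1 s2 _
  unfold Spec_checkEveryLetter checkEveryLetter checkEveryLetter_alt
  exact pvOuterLoop_eq_pvScan _ _ _ (pvCounts_getD s2.toList)
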